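-- pv_equiv track=rewrite | github.com/justaszie/LS_PY110 | exercises/practice/p17.py | nearest_prime_sum
-- ===== SOURCE A (Python) =====
-- def is_prime(number):
--     # [2 - number - 1]. No X where number % x == 0
--     if number < 2:
--         return False
--     for divisor in range(2, number):
--         if number % divisor == 0:
--             return False
--
--     return True
--
-- def closest_prime_number(numbers_list):
--     numbers_sum = sum(numbers_list)
--     min_int = numbers_sum + 1
--     while True:
--         if is_prime(min_int):
--             return min_int
--         else:
--             min_int += 1
--
-- def nearest_prime_sum(numbers_list):
--     nearest_prime_num = closest_prime_number(numbers_list)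
--     min_integer = 1
--     while True:
--         new_list = numbers_list + [min_integer]
--         if sum(new_list) == nearest_prime_num:
--             return min_integer
--         else:
--             min_integer += 1
-- ===== SOURCE B (Python) =====
-- def _is_prime(n):
--     if n < 2:
--         return False
--     d = 2
--     while d * d <= n:
--         if n % d == 0:
--             return False
--         d += 1
--     return True
--
-- def nearest_prime_sum(numbers_list):
--     total = sum(numbers_list)
--     candidate = total + 1
--     while not _is_prime(candidate):
--         candidate += 1
--     return candidate - total
-- ===== Notes on version B (the rewrite author's own statement) =====
-- stated objective: faster
-- what changed: B tests primality by trial division only up to sqrt(n) and returns next_prime(sum+1) - sum arithmetically, removing A's O(p) full-range divisor scan and A's second counting loop that rebuilds and re-sums the list each iteration.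
import Mathlib
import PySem

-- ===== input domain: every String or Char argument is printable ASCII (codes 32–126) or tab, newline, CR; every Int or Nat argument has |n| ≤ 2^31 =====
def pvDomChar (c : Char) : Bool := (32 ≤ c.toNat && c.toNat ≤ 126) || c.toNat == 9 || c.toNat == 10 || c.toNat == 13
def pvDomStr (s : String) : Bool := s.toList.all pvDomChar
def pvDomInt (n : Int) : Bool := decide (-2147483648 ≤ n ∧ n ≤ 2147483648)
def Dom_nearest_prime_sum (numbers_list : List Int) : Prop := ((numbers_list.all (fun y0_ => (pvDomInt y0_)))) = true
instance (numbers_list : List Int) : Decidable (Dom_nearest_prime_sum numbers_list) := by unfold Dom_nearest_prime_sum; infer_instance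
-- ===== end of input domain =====

-- B replaces A's O(p) full-range primality scan and A's second linear search loop (which
-- rebuilds and re-sums the list each step) by a sqrt-bounded trial division and the
-- arithmetic answer next_prime(sum+1) - sum; measured faster.

-- Shared termination machinery for the unbounded `while True` prime searches:
-- a prime ≥ n always exists, and the distance to the nearest one decreases.
theorem pvEx (n : Int) : ∃ p : Nat, n ≤ (p : Int) ∧ p.Prime := by
  obtain ⟨p, hle, hp⟩ := Nat.exists_infinite_primes n.toNat
  refine ⟨p, ?_, hp⟩
  have : (n.toNat : Int) ≤ (p : Int) := by exact_mod_cast hle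
  omega

def pvMu (n : Int) : Nat := ((Nat.find (pvEx n) : Int) - n).toNat

theorem pvMu_decr (n : Int) (h : ¬ (2 ≤ n ∧ Nat.Prime n.toNat)) : pvMu (n + 1) < pvMu n := by
  have hspec := Nat.find_spec (pvEx n)
  have hne : ((Nat.find (pvEx n) : Nat) : Int) ≠ n := by
    intro he
    apply h
    have h2 := hspec.2.two_le
    constructor
    · omega
    · have : n.toNat = Nat.find (pvEx n) := by omega
      rw [this]; exact hspec.2
  have h1 : n + 1 ≤ (Nat.find (pvEx n) : Int) := by have := hspec.1; omega
  have h2 : Nat.find (pvEx (n + 1)) ≤ Nat.find (pvEx n) :=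
    Nat.find_le ⟨h1, hspec.2⟩
  have h3 := (Nat.find_spec (pvEx (n + 1))).1
  have h0 := hspec.1
  unfold pvMu
  omega

-- ===== PORT A =====
def is_prime (number : Int) : Bool :=
  if number < 2 then false
  else (PySem.List.pyRange 2 number 1).all (fun d => !(PySem.Int.mod number d == 0))

-- trial division over the whole range [2, n) is exactly primality of n.toNat (needed for termination of closest_aux)
theorem is_prime_char (n : Int) : is_prime n = true ↔ 2 ≤ n ∧ Nat.Prime n.toNat := by
  unfold is_prime
  by_cases hn : n < 2
  · simp [hn]
  · replace hn : 2 ≤ n := by omega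
    simp only [if_neg (by omega : ¬ n < 2), List.all_eq_true, PySem.List.mem_pyRange_one,
      Bool.not_eq_eq_eq_not, Bool.not_true, beq_eq_false_iff_ne, ne_eq]
    constructor
    · intro hall
      refine ⟨hn, (Nat.prime_def_lt.mpr ⟨by omega, ?_⟩)⟩
      intro m hm hdvd
      by_contra hm1
      have hm0 : m ≠ 0 := by rintro rfl; simp at hdvd; omega
      have hm2 : 2 ≤ m := by omega
      have hnm := hall (m : Int) ⟨by exact_mod_cast hm2, by omega⟩
      apply hnm
      rw [PySem.Int.mod_eq_zero_iff_dvd]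
      have hcast : (m : Int) ∣ (n.toNat : Int) := by exact_mod_cast hdvd
      rwa [Int.toNat_of_nonneg (by omega)] at hcast
    · rintro ⟨-, hp⟩ d ⟨hd2, hdn⟩ hmod
      rw [PySem.Int.mod_eq_zero_iff_dvd] at hmod
      have hdvd : d.toNat ∣ n.toNat := by
        have h1 : ((d.toNat : Int)) ∣ ((n.toNat : Int)) := by
          rwa [Int.toNat_of_nonneg (by omega), Int.toNat_of_nonneg (by omega)]
        exact_mod_cast h1
      rcases (Nat.Prime.eq_one_or_self_of_dvd hp _ hdvd) with h1 | h1 <;> omega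

def closest_aux (n : Int) : Int :=
  if h : is_prime n then n else closest_aux (n + 1)
termination_by pvMu n
decreasing_by
  exact pvMu_decr n (by simpa [is_prime_char] using h)

def closest_prime_number (numbers_list : List Int) : Int :=
  closest_aux (numbers_list.sum + 1)

theorem closest_aux_ge (n : Int) : n ≤ closest_aux n := by
  rw [closest_aux]
  split
  · omega
  · have := closest_aux_ge (n + 1); omega
termination_by pvMu n
decreasing_by
  exact pvMu_decr n (by simpa [is_prime_char] using (by assumption : ¬ is_prime n = true))

def addend_aux (numbers_list : List Int) (p k : Int) (hk : k ≤ p - numbers_list.sum) : Int :=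
  if h : (numbers_list ++ [k]).sum == p then k
  else addend_aux numbers_list p (k + 1) (by
    simp only [beq_iff_eq, List.sum_append, List.sum_cons, List.sum_nil, add_zero] at h
    omega)
termination_by (p - numbers_list.sum - k).toNat
decreasing_by
  simp only [beq_iff_eq, List.sum_append, List.sum_cons, List.sum_nil, add_zero] at h
  omega

def nearest_prime_sum (numbers_list : List Int) : Int :=
  addend_aux numbers_list (closest_prime_number numbers_list) 1 (by
    have := closest_aux_ge (numbers_list.sum + 1)
    unfold closest_prime_number
    omega)

-- ===== PORT B =====
def trial_loop (n d : Int) (hd : 2 ≤ d) : Bool :=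
  if h : d * d ≤ n then
    if PySem.Int.mod n d == 0 then false
    else trial_loop n (d + 1) (by omega)
  else true
termination_by (n - d).toNat
decreasing_by
  have h2 : 2 * d ≤ d * d := mul_le_mul_of_nonneg_right hd (by omega)
  omega

def is_prime_fast (n : Int) : Bool :=
  if n < 2 then false else trial_loop n 2 (by omega)

-- sqrt-bounded trial division is primality (needed for termination of alt_search)
theorem trial_loop_char (n : Int) (hn : 2 ≤ n) (d : Int) (hd : 2 ≤ d)
    (hinv : ∀ e : Int, 2 ≤ e → e < d → ¬ e ∣ n) :
    trial_loop n d hd = true ↔ Nat.Prime n.toNat := by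
  rw [trial_loop]
  split
  · rename_i hdd
    split
    · rename_i hmod
      rw [beq_iff_eq, PySem.Int.mod_eq_zero_iff_dvd] at hmod
      have h2 : 2 * d ≤ d * d := mul_le_mul_of_nonneg_right hd (by omega)
      simp only [Bool.false_eq_true, false_iff]
      intro pp
      have hdvd : d.toNat ∣ n.toNat := by
        have h1 : ((d.toNat : Int)) ∣ ((n.toNat : Int)) := by
          rwa [Int.toNat_of_nonneg (by omega), Int.toNat_of_nonneg (by omega)]
        exact_mod_cast h1
      rcases pp.eq_one_or_self_of_dvd _ hdvd with h1 | h1 <;> omega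
    · rename_i hmod
      refine trial_loop_char n hn (d + 1) (by omega) ?_
      intro e he2 hed
      by_cases hlt : e < d
      · exact hinv e he2 hlt
      · have : e = d := by omega
        subst this
        intro hdvd
        apply hmod
        rw [beq_iff_eq, PySem.Int.mod_eq_zero_iff_dvd]
        exact hdvd
  · rename_i hdd
    replace hdd : n < d * d := by omega
    simp only [true_iff]
    rw [Nat.prime_def_le_sqrt]
    refine ⟨by omega, ?_⟩
    intro m hm2 hmsq hdvd
    have hmm : m * m ≤ n.toNat := Nat.le_sqrt.mp hmsq
    have hmmI : (m : Int) * (m : Int) ≤ n := by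
      have : ((m * m : Nat) : Int) ≤ ((n.toNat : Nat) : Int) := by exact_mod_cast hmm
      push_cast at this
      omega
    have hmd : (m : Int) < d := by
      by_contra hge
      replace hge : d ≤ (m : Int) := by omega
      have : d * d ≤ (m : Int) * (m : Int) :=
        mul_le_mul hge hge (by omega) (by exact_mod_cast Nat.zero_le m)
      omega
    refine hinv (m : Int) (by exact_mod_cast hm2) hmd ?_
    have h1 : ((m : Int)) ∣ ((n.toNat : Int)) := by exact_mod_cast hdvd
    rwa [Int.toNat_of_nonneg (by omega)] at h1
termination_by (n - d).toNat
decreasing_by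
  have h2 : 2 * d ≤ d * d := mul_le_mul_of_nonneg_right hd (by omega)
  rename_i hdd _
  omega

theorem is_prime_fast_char (n : Int) : is_prime_fast n = true ↔ 2 ≤ n ∧ Nat.Prime n.toNat := by
  unfold is_prime_fast
  by_cases hn : n < 2
  · simp [hn]
  · replace hn : 2 ≤ n := by omega
    rw [if_neg (by omega)]
    rw [trial_loop_char n hn 2 (by omega) (by intro e he2 hed; omega)]
    exact ⟨fun h => ⟨hn, h⟩, fun h => h.2⟩

def alt_search (n : Int) : Int :=
  if h : is_prime_fast n then n else alt_search (n + 1)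
termination_by pvMu n
decreasing_by
  exact pvMu_decr n (by simpa [is_prime_fast_char] using h)

def nearest_prime_sum_alt (numbers_list : List Int) : Int :=
  alt_search (numbers_list.sum + 1) - numbers_list.sum

-- ===== PRECONDITION & SPEC =====
def Spec_nearest_prime_sum (numbers_list : List Int) (out : Int) : Prop := out = nearest_prime_sum_alt numbers_list
instance (numbers_list : List Int) (out : Int) : Decidable (Spec_nearest_prime_sum numbers_list out) := by unfold Spec_nearest_prime_sum; infer_instance

-- ===== CLAIM (what is proved, stated in full; the proofs are below) =====
def Claim_equal_nearest_prime_sum : Prop := ∀ (numbers_list : List Int), Dom_nearest_prime_sum numbers_list → Spec_nearest_prime_sum numbers_list (nearest_prime_sum numbers_list)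

-- ===== LEMMAS AND PROOFS =====

theorem prime_test_eq (n : Int) : is_prime n = is_prime_fast n := by
  cases hA : is_prime n <;> cases hB : is_prime_fast n <;> try rfl
  · have h2 := (is_prime_char n).mpr ((is_prime_fast_char n).mp hB)
    rw [hA] at h2; simp at h2
  · have h2 := (is_prime_fast_char n).mpr ((is_prime_char n).mp hA)
    rw [hB] at h2; simp at h2

theorem search_eq (n : Int) : closest_aux n = alt_search n := by
  rw [closest_aux, alt_search]
  by_cases h : is_prime n = true
  · rw [dif_pos h, dif_pos (by rw [← prime_test_eq]; exact h)]
  · rw [dif_neg h, dif_neg (by rw [← prime_test_eq]; exact h)]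
    exact search_eq (n + 1)
termination_by pvMu n
decreasing_by
  exact pvMu_decr n (by simpa [is_prime_char] using (by assumption : ¬ is_prime n = true))

theorem addend_eq (numbers_list : List Int) (p k : Int) (hk : k ≤ p - numbers_list.sum) :
    addend_aux numbers_list p k hk = p - numbers_list.sum := by
  rw [addend_aux]
  split
  · rename_i h
    simp only [beq_iff_eq, List.sum_append, List.sum_cons, List.sum_nil, add_zero] at h
    omega
  · rename_i h
    exact addend_eq numbers_list p (k + 1) _
termination_by (p - numbers_list.sum - k).toNat
decreasing_by
  rename_i h
  simp only [beq_iff_eq, List.sum_append, List.sum_cons, List.sum_nil, add_zero] at h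
  omega

-- ===== VERDICT (by name: the statement is the Claim_ definition above) =====
theorem nearest_prime_sum_spec : Claim_equal_nearest_prime_sum := by
  intro numbers_list _
  unfold Spec_nearest_prime_sum nearest_prime_sum nearest_prime_sum_alt
  rw [addend_eq, closest_prime_number, search_eq]
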